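-- pv_equiv track=rewrite | github.com/farhanfHARAHAP/Praktikum-Algoritma | Latihan/Latihan7_Binary Search.py | vnomor
-- ===== SOURCE A (Python) =====
-- def vnomor(arr, l, r, x):
--
--     if r >= l:
--
--         mid = l + (r - l) // 2
--
--         if mid == x:
--             return mid
--
--         elif mid > x:
--             return vnomor(arr, l, mid-1, x)
--
--         else:
--             return vnomor(arr, mid + 1, r, x)
--
--     else:
--         return -1
-- ===== SOURCE B (Python) =====
-- def vnomor(arr, l, r, x):
--     # A compares the index mid to x, so it merely tests
--     # whether x lies in the index interval [l, r].
--     return x if l <= x <= r else -1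
-- ===== Notes on version B (the rewrite author's own statement) =====
-- stated objective: simpler
-- what changed: Replaced the recursive binary search over the index interval (which compares mid to x, hence only tests membership of x in [l,r]) by a direct bounds check 'x if l<=x<=r else -1'.
import Mathlib
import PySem

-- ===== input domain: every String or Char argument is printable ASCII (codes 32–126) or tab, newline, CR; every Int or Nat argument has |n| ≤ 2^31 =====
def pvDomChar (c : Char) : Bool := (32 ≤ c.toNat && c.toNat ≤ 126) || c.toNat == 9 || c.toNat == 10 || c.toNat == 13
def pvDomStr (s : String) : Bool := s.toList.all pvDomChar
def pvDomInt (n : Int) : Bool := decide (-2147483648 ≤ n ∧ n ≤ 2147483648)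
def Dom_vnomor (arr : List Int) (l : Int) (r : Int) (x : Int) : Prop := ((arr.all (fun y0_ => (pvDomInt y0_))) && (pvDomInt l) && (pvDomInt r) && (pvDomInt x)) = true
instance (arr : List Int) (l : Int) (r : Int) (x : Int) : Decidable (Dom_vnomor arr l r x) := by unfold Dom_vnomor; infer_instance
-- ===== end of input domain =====

-- B replaces A's recursive binary search over the index interval by a direct bounds check:
-- A never reads arr (it compares the index mid with x), so it returns x iff l ≤ x ≤ r.

-- ===== PORT A =====
def vnomor (arr : List Int) (l : Int) (r : Int) (x : Int) : Int :=
  if r ≥ l then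
    let mid := l + PySem.Int.floordiv (r - l) 2
    if mid = x then mid
    else if mid > x then vnomor arr l (mid - 1) x
    else vnomor arr (mid + 1) r x
  else -1
termination_by (r - l + 1).toNat
decreasing_by
  · have h2 : PySem.Int.floordiv (r - l) 2 = (r - l) / 2 :=
      PySem.Int.floordiv_eq_ediv_of_pos (by omega)
    simp only [h2] at *
    omega
  · have h2 : PySem.Int.floordiv (r - l) 2 = (r - l) / 2 :=
      PySem.Int.floordiv_eq_ediv_of_pos (by omega)
    simp only [h2] at *
    omega

-- ===== PORT B =====
def vnomor_alt (arr : List Int) (l : Int) (r : Int) (x : Int) : Int :=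
  if l ≤ x ∧ x ≤ r then x else -1

-- ===== PRECONDITION & SPEC =====
def Spec_vnomor (arr : List Int) (l : Int) (r : Int) (x : Int) (out : Int) : Prop := out = vnomor_alt arr l r x
instance (arr : List Int) (l : Int) (r : Int) (x : Int) (out : Int) : Decidable (Spec_vnomor arr l r x out) := by unfold Spec_vnomor; infer_instance

-- ===== CLAIM (what is proved, stated in full; the proofs are below) =====
def Claim_equal_vnomor : Prop := ∀ (arr : List Int) (l : Int) (r : Int) (x : Int), Dom_vnomor arr l r x → Spec_vnomor arr l r x (vnomor arr l r x)

-- ===== LEMMAS AND PROOFS =====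

theorem vnomor_eq_alt (arr : List Int) (l r x : Int) :
    vnomor arr l r x = vnomor_alt arr l r x := by
  fun_induction vnomor arr l r x with
  | case1 l r hge mid heq =>
      simp only [vnomor_alt]
      have h2 : PySem.Int.floordiv (r - l) 2 = (r - l) / 2 :=
        PySem.Int.floordiv_eq_ediv_of_pos (by omega)
      rw [if_pos]
      · omega
      · simp only [mid, h2] at heq ⊢; omega
  | case2 l r hge mid hne hgt ih =>
      rw [ih]
      simp only [vnomor_alt]
      have h2 : PySem.Int.floordiv (r - l) 2 = (r - l) / 2 :=
        PySem.Int.floordiv_eq_ediv_of_pos (by omega)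
      simp only [mid, h2] at hgt
      split_ifs with h1 h2' h2' <;> omega
  | case3 l r hge mid hne hle ih =>
      rw [ih]
      simp only [vnomor_alt]
      have h2 : PySem.Int.floordiv (r - l) 2 = (r - l) / 2 :=
        PySem.Int.floordiv_eq_ediv_of_pos (by omega)
      simp only [mid, h2] at hne hle
      split_ifs with h1 h2' h2' <;> omega
  | case4 l r hlt =>
      simp only [vnomor_alt]
      rw [if_neg]; omega

-- ===== VERDICT (by name: the statement is the Claim_ definition above) =====
theorem vnomor_spec : Claim_equal_vnomor := by
  intro arr l r x _
  exact vnomor_eq_alt arr l r x
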